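-- pv_equiv track=rewrite | github.com/ioannisCC/genetic-algorithm-graph-coloring | assignment.py | smallest_power_of_2
-- ===== SOURCE A (Python) =====
-- def smallest_power_of_2(n):
--
--     if n <= 0:
--         return None  # only positive numbers are considered
--     power = 1
--     exponent = 0
--     while power < n:
--         power *= 2
--         exponent += 1
--     return power, exponent
-- ===== SOURCE B (Python) =====
-- def smallest_power_of_2(n):
--     if n <= 0:
--         return None  # only positive numbers are considered
--     exponent = (n - 1).bit_length()
--     return 1 << exponent, exponent
-- ===== Notes on version B (the rewrite author's own statement) =====
-- stated objective: simpler
-- what changed: Replaces the doubling while-loop with a closed-form computation: the exponent via bit_length of the predecessor and the power via a single shift.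
import Mathlib
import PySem

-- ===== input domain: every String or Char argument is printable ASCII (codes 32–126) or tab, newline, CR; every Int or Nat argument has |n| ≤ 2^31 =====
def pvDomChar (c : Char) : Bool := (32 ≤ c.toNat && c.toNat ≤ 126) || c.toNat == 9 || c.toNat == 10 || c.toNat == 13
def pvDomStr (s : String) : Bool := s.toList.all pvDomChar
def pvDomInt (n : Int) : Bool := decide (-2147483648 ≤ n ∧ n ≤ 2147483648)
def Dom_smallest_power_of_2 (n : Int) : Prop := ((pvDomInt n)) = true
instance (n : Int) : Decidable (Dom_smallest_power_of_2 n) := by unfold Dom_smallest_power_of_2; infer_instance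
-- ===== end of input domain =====

-- B replaces A's doubling while-loop by the closed form exponent = (n-1).bit_length(), power = 1 << exponent (simpler, no iteration).


-- ===== PORT A =====
-- the while-loop of A: while power < n: power *= 2; exponent += 1
-- (the hypothesis 0 < power only justifies termination; A always enters with power = 1)
def spLoop (n power exponent : Int) (hp : 0 < power) : Int × Int :=
  if power < n then spLoop n (power * 2) (exponent + 1) (by omega) else (power, exponent)
termination_by (n - power).toNat
decreasing_by omega

def smallest_power_of_2 (n : Int) : Option (Int × Int) :=
  if n ≤ 0 then none
  else some (spLoop n 1 0 (by omega))

-- ===== PORT B =====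
def smallest_power_of_2_alt (n : Int) : Option (Int × Int) :=
  if n ≤ 0 then none
  else
    let exponent := PySem.Int.bitLength (n - 1)
    some (1 <<< exponent, (exponent : Int))

-- ===== CLAIM (what is proved, stated in full; the proofs are below) =====
def Spec_smallest_power_of_2 (n : Int) (out : Option (Int × Int)) : Prop := out = smallest_power_of_2_alt n
instance (n : Int) (out : Option (Int × Int)) : Decidable (Spec_smallest_power_of_2 n out) := by unfold Spec_smallest_power_of_2; infer_instance

def Claim_equal_smallest_power_of_2 : Prop := ∀ (n : Int), Dom_smallest_power_of_2 n → Spec_smallest_power_of_2 n (smallest_power_of_2 n)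

-- ===== LEMMAS AND PROOFS =====

-- the loop, entered at power = 2^k with k ≤ e := bitLength (n-1), returns (2^e, e)
lemma spLoop_pow (n : Int) (hn : 0 < n) (k : Nat) (hk : k ≤ PySem.Int.bitLength (n - 1)) :
    spLoop n ((2 : Int) ^ k) (k : Int) (by positivity) =
      ((2 : Int) ^ PySem.Int.bitLength (n - 1), (PySem.Int.bitLength (n - 1) : Int)) := by
  set e := PySem.Int.bitLength (n - 1) with he
  have hub : n ≤ (2 : Int) ^ e := by
    have h := PySem.Int.lt_two_pow_bitLength (n - 1)
    rw [← he] at h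
    have h1 : ((n - 1).natAbs : Int) < (((2 : Nat) ^ e : Nat) : Int) := by exact_mod_cast h
    rw [Int.natAbs_of_nonneg (by omega)] at h1
    push_cast at h1
    omega
  induction hgap : e - k generalizing k with
  | zero =>
    have hke : k = e := by omega
    subst hke
    rw [spLoop]
    simp [not_lt.mpr hub]
  | succ m ih =>
    have hklt : k < e := by omega
    have hlb : (2 : Int) ^ (e - 1) ≤ n - 1 := by
      have hne : n - 1 ≠ 0 := by
        intro h0
        have : e = 0 := by rw [he, h0]; exact PySem.Int.bitLength_zero
        omega
      have h := PySem.Int.two_pow_bitLength_le (n - 1) hne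
      rw [← he] at h
      have h1 : (((2 : Nat) ^ (e - 1) : Nat) : Int) ≤ ((n - 1).natAbs : Int) := by exact_mod_cast h
      rw [Int.natAbs_of_nonneg (by omega)] at h1
      push_cast at h1
      omega
    have hkn : (2 : Int) ^ k < n := by
      have hmono : (2 : Int) ^ k ≤ (2 : Int) ^ (e - 1) :=
        pow_le_pow_right₀ (by norm_num) (by omega)
      omega
    rw [spLoop]
    simp only [if_pos hkn]
    have heq : spLoop n ((2 : Int) ^ k * 2) ((k : Int) + 1) (by positivity) =
        spLoop n ((2 : Int) ^ (k + 1)) (((k + 1 : Nat) : Int)) (by positivity) := by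
      congr 1
    rw [heq]
    exact ih (k + 1) (by omega) (by omega)

-- ===== VERDICT (by name: the statement is the Claim_ definition above) =====
theorem smallest_power_of_2_spec : Claim_equal_smallest_power_of_2 := by
  intro n _
  unfold Spec_smallest_power_of_2 smallest_power_of_2 smallest_power_of_2_alt
  by_cases h : n ≤ 0
  · simp [h]
  · have hn : 0 < n := by omega
    simp only [if_neg h]
    have := spLoop_pow n hn 0 (Nat.zero_le _)
    simp only [pow_zero, Nat.cast_zero] at this
    rw [this]
    simp [Int.shiftLeft_eq]
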